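-- pv_equiv track=rewrite | github.com/omniakhaled123/Genetics_mutation | main.py | listing_rna
-- ===== SOURCE A (Python) =====
-- def listing_rna (seqrna):
--      triple=[]
--      for i in range(0,len(seqrna),3):
--         x=""
--         x=seqrna[i:i+3]
--         if x=='UGA'or x=='UAG'or x=='UAA':
--            break
--         triple.append(x)
--      return triple
-- ===== SOURCE B (Python) =====
-- def listing_rna(seqrna):
--     out = []
--     buf = []
--     for ch in seqrna:
--         buf.append(ch)
--         if len(buf) == 3:
--             codon = ''.join(buf)
--             if codon in ('UGA', 'UAG', 'UAA'):
--                 return out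
--             out.append(codon)
--             buf = []
--     if buf:
--         out.append(''.join(buf))
--     return out
-- ===== Notes on version B (the rewrite author's own statement) =====
-- stated objective: alternative
-- what changed: B folds over the characters one at a time with a 3-char buffer, emitting a codon each time the buffer fills and flushing a partial buffer at the end, instead of A's indexed loop over range(0,len,3) that slices seqrna[i:i+3] and breaks.
import Mathlib
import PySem

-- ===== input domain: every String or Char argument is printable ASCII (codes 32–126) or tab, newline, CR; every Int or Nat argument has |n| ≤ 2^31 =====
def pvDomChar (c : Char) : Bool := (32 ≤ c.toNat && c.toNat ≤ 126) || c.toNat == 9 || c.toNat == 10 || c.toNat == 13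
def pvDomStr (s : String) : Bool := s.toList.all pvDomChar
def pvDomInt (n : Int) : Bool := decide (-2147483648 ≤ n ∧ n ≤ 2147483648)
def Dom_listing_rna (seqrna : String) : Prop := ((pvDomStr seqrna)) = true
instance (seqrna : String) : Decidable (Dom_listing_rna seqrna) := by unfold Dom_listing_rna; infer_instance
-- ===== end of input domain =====

-- B replaces A's indexed for-loop-with-break-and-append by a structural recursion on the
-- string (head codon, recurse on the 3-shifted tail) — objective: alternative decomposition.

-- ===== PORT A =====
-- the for-loop over range(0,len,3) with break: recursion over the index list, carrying `triple`
def pvGoA (s : List Char) : List Int → List String → List String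
  | [], triple => triple
  | i :: rest, triple =>
    let x := String.mk (PySem.List.slice s (some i) (some (i + 3)))
    if x = "UGA" ∨ x = "UAG" ∨ x = "UAA" then triple
    else pvGoA s rest (triple ++ [x])

def listing_rna (seqrna : String) : List String :=
  pvGoA seqrna.toList (PySem.List.pyRange 0 (PySem.Str.len seqrna) 3) []

-- ===== PORT B =====
-- Source B's character loop: state = (out, buf); the early `return out` ends the recursion;
-- after the loop a non-empty buffer is flushed
def pvGoB : List Char → List String → List Char → List String
  | [], out, buf => if buf = [] then out else out ++ [String.mk buf]
  | ch :: rest, out, buf =>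
    let buf' := buf ++ [ch]
    if buf'.length = 3 then
      let codon := String.mk buf'
      if codon = "UGA" ∨ codon = "UAG" ∨ codon = "UAA" then out
      else pvGoB rest (out ++ [codon]) []
    else pvGoB rest out buf'

def listing_rna_alt (seqrna : String) : List String := pvGoB seqrna.toList [] []

-- ===== PRECONDITION & SPEC =====
def Spec_listing_rna (seqrna : String) (out : List String) : Prop := out = listing_rna_alt seqrna
instance (seqrna : String) (out : List String) : Decidable (Spec_listing_rna seqrna out) := by unfold Spec_listing_rna; infer_instance

-- ===== CLAIM (what is proved, stated in full; the proofs are below) =====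
def Claim_equal_listing_rna : Prop := ∀ (seqrna : String), Dom_listing_rna seqrna → Spec_listing_rna seqrna (listing_rna seqrna)

-- ===== LEMMAS AND PROOFS =====

-- reference function both ports are reduced to: chunk until a stop codon, recursing on the tail
def pvChunks (cs : List Char) : List String :=
  if h : cs = [] then []
  else
    let x := String.mk (cs.take 3)
    if x = "UGA" ∨ x = "UAG" ∨ x = "UAA" then [] else x :: pvChunks (cs.drop 3)
termination_by cs.length
decreasing_by cases cs with
  | nil => exact absurd rfl h
  | cons c cs' => simp

-- a string of fewer than 3 characters is not a stop codon
lemma pvShortNotStop (l : List Char) (hl : l.length < 3) :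
    ¬ (String.mk l = "UGA" ∨ String.mk l = "UAG" ∨ String.mk l = "UAA") := by
  intro h
  have htl : (String.mk l).toList = l := Eq.symm ((fun {l} {s} => String.ofList_eq.mp) rfl)
  rcases h with h | h | h <;>
  · have h2 := congrArg String.toList h
    rw [htl] at h2
    subst h2
    simp at hl

lemma pyRange3_nil (a b : Int) (h : b ≤ a) : PySem.List.pyRange a b 3 = [] := by
  rw [PySem.List.pyRange_of_pos a b (by norm_num)]
  simp [not_lt.mpr h]

lemma pyRange3_cons (a b : Int) (h : a < b) :
    PySem.List.pyRange a b 3 = a :: PySem.List.pyRange (a + 3) b 3 := by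
  rw [PySem.List.pyRange_of_pos a b (by norm_num),
      PySem.List.pyRange_of_pos (a + 3) b (by norm_num)]
  have hm : (if a < b then ((b - a + 3 - 1) / 3).toNat else 0)
      = (if a + 3 < b then ((b - (a + 3) + 3 - 1) / 3).toNat else 0) + 1 := by
    split_ifs <;> omega
  rw [hm, List.range_succ_eq_map]
  simp [List.map_map, Function.comp]
  intro k _
  ring

lemma pvSlice3 (s : List Char) (j : ℕ) :
    PySem.List.slice s (some (j : Int)) (some ((j : Int) + 3)) = (s.drop j).take 3 := by
  have h3 : ((j : Int) + 3) = ((j : Int) + ((3 : ℕ) : Int)) := by norm_num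
  rw [h3, PySem.List.slice_natCast_add]

lemma pvChunks_eq (cs : List Char) :
    pvChunks cs =
      (if cs = [] then []
       else if String.mk (cs.take 3) = "UGA" ∨ String.mk (cs.take 3) = "UAG" ∨ String.mk (cs.take 3) = "UAA" then []
       else String.mk (cs.take 3) :: pvChunks (cs.drop 3)) := by
  rw [pvChunks]
  by_cases h : cs = []
  · rw [dif_pos h, if_pos h]
  · rw [dif_neg h, if_neg h]

lemma pvA_gen (s : List Char) :
    ∀ (d j : ℕ) (acc : List String), s.length - j ≤ d →
      pvGoA s (PySem.List.pyRange (j : Int) (s.length : Int) 3) acc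
        = acc ++ pvChunks (s.drop j) := by
  intro d
  induction d with
  | zero =>
    intro j acc h
    have hj : s.length ≤ j := by omega
    rw [pyRange3_nil _ _ (by exact_mod_cast hj)]
    rw [List.drop_eq_nil_iff.mpr hj, pvChunks]
    simp [pvGoA]
  | succ d ih =>
    intro j acc h
    by_cases hj : s.length ≤ j
    · rw [pyRange3_nil _ _ (by exact_mod_cast hj)]
      rw [List.drop_eq_nil_iff.mpr hj, pvChunks]
      simp [pvGoA]
    · push_neg at hj
      have hne : s.drop j ≠ [] := by simp [List.drop_eq_nil_iff]; omega
      rw [pyRange3_cons _ _ (by exact_mod_cast hj)]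
      rw [pvGoA, pvChunks_eq, if_neg hne, pvSlice3]
      by_cases hstop : String.mk ((s.drop j).take 3) = "UGA" ∨
          String.mk ((s.drop j).take 3) = "UAG" ∨ String.mk ((s.drop j).take 3) = "UAA"
      · rw [if_pos hstop, if_pos hstop]
        simp
      · rw [if_neg hstop, if_neg hstop]
        have hdd : (s.drop j).drop 3 = s.drop (j + 3) := by rw [List.drop_drop]
        have hcast : ((j : Int) + 3) = (((j + 3 : ℕ) : Int)) := by push_cast; ring
        rw [hdd, hcast, ih (j + 3) (acc ++ [String.mk ((s.drop j).take 3)]) (by omega)]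
        simp

lemma pvB_gen : ∀ (d : ℕ) (cs : List Char) (out : List String), cs.length ≤ d →
    pvGoB cs out [] = out ++ pvChunks cs := by
  intro d
  induction d with
  | zero =>
    intro cs out h
    have : cs = [] := List.eq_nil_of_length_eq_zero (by omega)
    subst this
    rw [pvChunks]
    simp [pvGoB]
  | succ d ih =>
    intro cs out h
    match cs with
    | [] => rw [pvChunks]; simp [pvGoB]
    | [a] =>
      rw [pvChunks_eq, if_neg (by simp)]
      simp only [show List.take 3 [a] = [a] from rfl, show List.drop 3 [a] = ([] : List Char) from rfl]
      rw [if_neg (pvShortNotStop [a] (by simp))]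
      rw [pvChunks]
      simp [pvGoB]
    | [a, b] =>
      rw [pvChunks_eq, if_neg (by simp)]
      simp only [show List.take 3 [a, b] = [a, b] from rfl, show List.drop 3 [a, b] = ([] : List Char) from rfl]
      rw [if_neg (pvShortNotStop [a, b] (by simp))]
      rw [pvChunks]
      simp [pvGoB]
    | a :: b :: c :: rest =>
      rw [pvChunks_eq, if_neg (by simp)]
      have htake : (a :: b :: c :: rest).take 3 = [a, b, c] := by simp
      rw [htake]
      simp only [pvGoB, List.nil_append, List.singleton_append, List.cons_append,
                 List.length_cons, List.length_nil]
      norm_num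
      by_cases hstop : String.mk [a, b, c] = "UGA" ∨ String.mk [a, b, c] = "UAG" ∨
          String.mk [a, b, c] = "UAA"
      · rw [if_pos hstop, if_pos hstop]
        simp
      · rw [if_neg hstop, if_neg hstop]
        have hrest : rest.length ≤ d := by simp at h; omega
        rw [ih rest (out ++ [String.mk [a, b, c]]) hrest]
        simp

-- ===== VERDICT (by name: the statement is the Claim_ definition above) =====
theorem listing_rna_spec : Claim_equal_listing_rna := by
  intro s _
  unfold Spec_listing_rna listing_rna listing_rna_alt
  have hlen : PySem.Str.len s = ((s.toList.length : ℕ) : Int) := by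
    simp [PySem.Str.len_eq]
  have h0 : (0 : Int) = (((0 : ℕ) : Int)) := rfl
  rw [hlen, h0, pvA_gen s.toList s.toList.length 0 [] (by omega)]
  rw [pvB_gen s.toList.length s.toList [] le_rfl]
  simp
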